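-- pv_equiv track=rewrite | github.com/DarwinWhite/Self-driving-Car | Project Main.py | SplitDirections
-- ===== SOURCE A (Python) =====
-- def SplitDirections(keywords, numbers):
--     firstKey = []
--     secondKey = []
--     firstNums = []
--     secondNums = []
--     for i in range(len(keywords)):
--         if ("Drive" in keywords[i]):
--             firstKey = keywords[0:i]
--             secondKey = keywords[i:]
--             firstNums = numbers[0:i]
--             secondNums = numbers[i:]
--     return firstKey, firstNums, secondKey, secondNums
-- ===== SOURCE B (Python) =====
-- def SplitDirections(keywords, numbers):
--     for i in range(len(keywords) - 1, -1, -1):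
--         if "Drive" in keywords[i]:
--             return keywords[:i], numbers[:i], keywords[i:], numbers[i:]
--     return [], [], [], []
-- ===== Notes on version B (the rewrite author's own statement) =====
-- stated objective: alternative
-- what changed: B scans backwards and returns at the first (i.e. last overall) 'Drive' match instead of A's forward loop that overwrites all four slices at every match.
import Mathlib
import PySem

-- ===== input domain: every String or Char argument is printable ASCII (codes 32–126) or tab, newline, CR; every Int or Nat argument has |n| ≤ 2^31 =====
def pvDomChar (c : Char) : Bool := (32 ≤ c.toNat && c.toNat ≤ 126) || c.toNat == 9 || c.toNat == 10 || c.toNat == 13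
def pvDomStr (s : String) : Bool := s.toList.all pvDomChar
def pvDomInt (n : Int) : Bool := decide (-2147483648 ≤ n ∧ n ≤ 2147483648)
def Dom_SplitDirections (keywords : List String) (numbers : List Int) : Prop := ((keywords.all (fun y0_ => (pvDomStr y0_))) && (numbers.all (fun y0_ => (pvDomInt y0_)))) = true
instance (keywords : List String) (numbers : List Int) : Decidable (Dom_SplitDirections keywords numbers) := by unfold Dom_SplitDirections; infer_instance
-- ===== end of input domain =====

-- B replaces A's forward loop (which re-slices all four lists at every match) by a
-- backward scan that returns at the last 'Drive' match; objective: alternative decomposition.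

-- ===== PORT A =====
def SplitDirections (keywords : List String) (numbers : List Int) : List String × List Int × List String × List Int :=
  (PySem.List.pyRange 0 (keywords.length : Int) 1).foldl
    (fun st i =>
      if PySem.Str.isIn "Drive" (PySem.List.pyGetD keywords i "") then
        (PySem.List.slice keywords (some 0) (some i),
         PySem.List.slice numbers (some 0) (some i),
         PySem.List.slice keywords (some i) none,
         PySem.List.slice numbers (some i) none)
      else st)
    ([], [], [], [])

-- ===== PORT B =====
-- reverse scan: index n-1 down to 0, early return at the first match
def splitRevScan (keywords : List String) (numbers : List Int) : Nat → List String × List Int × List String × List Int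
  | 0 => ([], [], [], [])
  | n + 1 =>
    if PySem.Str.isIn "Drive" (PySem.List.pyGetD keywords (n : Int) "") then
      (PySem.List.slice keywords none (some (n : Int)),
       PySem.List.slice numbers none (some (n : Int)),
       PySem.List.slice keywords (some (n : Int)) none,
       PySem.List.slice numbers (some (n : Int)) none)
    else splitRevScan keywords numbers n

def SplitDirections_alt (keywords : List String) (numbers : List Int) : List String × List Int × List String × List Int :=
  splitRevScan keywords numbers keywords.length

-- ===== PRECONDITION & SPEC =====
def Spec_SplitDirections (keywords : List String) (numbers : List Int) (out : List String × List Int × List String × List Int) : Prop := out = SplitDirections_alt keywords numbers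
instance (keywords : List String) (numbers : List Int) (out : List String × List Int × List String × List Int) : Decidable (Spec_SplitDirections keywords numbers out) := by unfold Spec_SplitDirections; infer_instance

-- ===== CLAIM (what is proved, stated in full; the proofs are below) =====
def Claim_equal_SplitDirections : Prop := ∀ (keywords : List String) (numbers : List Int), Dom_SplitDirections keywords numbers → Spec_SplitDirections keywords numbers (SplitDirections keywords numbers)

-- ===== LEMMAS AND PROOFS =====

-- A's loop over range(0, n) equals B's reverse scan with fuel n.
theorem foldl_eq_splitRevScan (keywords : List String) (numbers : List Int) (n : Nat) :
    (PySem.List.pyRange 0 (n : Int) 1).foldl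
      (fun st i =>
        if PySem.Str.isIn "Drive" (PySem.List.pyGetD keywords i "") then
          (PySem.List.slice keywords (some 0) (some i),
           PySem.List.slice numbers (some 0) (some i),
           PySem.List.slice keywords (some i) none,
           PySem.List.slice numbers (some i) none)
        else st)
      ([], [], [], []) = splitRevScan keywords numbers n := by
  induction n with
  | zero => simp [splitRevScan]
  | succ n ih =>
    have hcast : ((n + 1 : Nat) : Int) = (n : Int) + 1 := by push_cast; ring
    rw [hcast, PySem.List.pyRange_one_succ_right (by positivity), List.foldl_append]
    simp only [List.foldl_cons, List.foldl_nil, ih, splitRevScan]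
    split <;> simp

theorem SplitDirections_spec' (keywords : List String) (numbers : List Int) :
    SplitDirections keywords numbers = SplitDirections_alt keywords numbers := by
  unfold SplitDirections SplitDirections_alt
  exact foldl_eq_splitRevScan keywords numbers keywords.length

-- ===== VERDICT (by name: the statement is the Claim_ definition above) =====
theorem SplitDirections_spec : Claim_equal_SplitDirections := by
  intro keywords numbers _
  exact SplitDirections_spec' keywords numbers
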